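-- pv_equiv track=rewrite | github.com/cobaltt7/python-exercises | 3 puzzles/88-90.py | eightyNine
-- ===== SOURCE A (Python) =====
-- from math import floor
--
-- def is_prime(number):
--     if number < 2:
--         return False
--     for i in range(2, floor(number / 2) + 1):
--         if number % i == 0:
--             return False
--     return True
--
-- def eightyNine(data):
--     """
--     Write a Python program to find all integers <= 1000 that are the product of exactly three
--     primes. Each integer should be represented as a list of its three prime factors.
--     """
--
--     output = []
--     for one in range(data):
--         if not is_prime(one):
--             continue
--         for two in range(data):
--             if not is_prime(two):
--                 continue
--             for three in range(data):
--                 if not is_prime(three):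
--                     continue
--                 if (one * two * three) > data:
--                     continue
--                 output.append([one, two, three])
--     return output
-- ===== SOURCE B (Python) =====
-- def _is_prime(m):
--     if m < 2:
--         return False
--     i = 2
--     while i * i <= m:
--         if m % i == 0:
--             return False
--         i += 1
--     return True
--
--
-- def eightyNine(data):
--     primes = [m for m in range(data) if _is_prime(m)]
--     out = []
--     for a in primes:
--         for b in primes:
--             ab = a * b
--             for c in primes:
--                 if ab * c > data:
--                     break
--                 out.append([a, b, c])
--     return out
-- ===== Notes on version B (the rewrite author's own statement) =====
-- stated objective: faster
-- what changed: B computes the prime list once (trial division only up to sqrt(m) instead of m/2) and then iterates the three nested loops over that list, breaking the inner loop as soon as the product exceeds data, instead of A's re-running an O(n) primality test inside every level of three loops over the full range.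
import Mathlib
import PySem

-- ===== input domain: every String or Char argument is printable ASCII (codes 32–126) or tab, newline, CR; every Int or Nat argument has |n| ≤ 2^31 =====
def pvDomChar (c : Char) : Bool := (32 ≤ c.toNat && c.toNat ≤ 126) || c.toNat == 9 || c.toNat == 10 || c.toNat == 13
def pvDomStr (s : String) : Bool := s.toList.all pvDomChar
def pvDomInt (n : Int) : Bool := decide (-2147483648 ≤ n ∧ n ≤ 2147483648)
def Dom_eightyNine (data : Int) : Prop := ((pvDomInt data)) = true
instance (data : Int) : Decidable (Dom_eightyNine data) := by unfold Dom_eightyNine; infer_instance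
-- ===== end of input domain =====

-- B computes the prime list once (trial division only up to sqrt(m)) and loops over
-- that list with an early break in the innermost loop, instead of A's O(n) primality
-- test inside three nested loops over the whole range; same return value everywhere.

-- ===== PORT A =====
-- is_prime: trial division by every i in range(2, floor(number/2)+1); the early
-- `return False` on the first divisor is `.all` over the same range.
def isPrimeA (n : Int) : Bool :=
  if n < 2 then false
  else (PySem.List.pyRange 2 (PySem.Int.floordiv n 2 + 1) 1).all
    (fun i => !(PySem.Int.mod n i == 0))

def eightyNine (data : Int) : List (List Int) :=
  (PySem.List.pyRange 0 data 1).foldl (fun out one =>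
    if !isPrimeA one then out else
    (PySem.List.pyRange 0 data 1).foldl (fun out two =>
      if !isPrimeA two then out else
      (PySem.List.pyRange 0 data 1).foldl (fun out three =>
        if !isPrimeA three then out
        else if one * two * three > data then out
        else out ++ [[one, two, three]]) out) out) []

-- ===== PORT B =====
-- `while i * i <= m: if m % i == 0: return False; i += 1` of _is_prime
def trialB (m i : Int) : Bool :=
  if h : i * i ≤ m then
    (if PySem.Int.mod m i == 0 then false else trialB m (i + 1))
  else true
termination_by (m + 1 - i).toNat
decreasing_by
  have hi : i ≤ m := by nlinarith [sq_nonneg (i - 1)]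
  omega

def isPrimeB (m : Int) : Bool := if m < 2 then false else trialB m 2

-- innermost `for c in primes: if ab * c > data: break; out.append([a, b, c])`
def innerB (data ab a b : Int) (acc : List (List Int)) : List Int → List (List Int)
  | [] => acc
  | c :: cs => if ab * c > data then acc else innerB data ab a b (acc ++ [[a, b, c]]) cs

def eightyNine_alt (data : Int) : List (List Int) :=
  let primes := (PySem.List.pyRange 0 data 1).filter isPrimeB
  primes.foldl (fun out a =>
    primes.foldl (fun out b =>
      innerB data (a * b) a b out primes) out) []

-- ===== PRECONDITION & SPEC =====
def Spec_eightyNine (data : Int) (out : List (List Int)) : Prop := out = eightyNine_alt data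
instance (data : Int) (out : List (List Int)) : Decidable (Spec_eightyNine data out) := by unfold Spec_eightyNine; infer_instance

-- ===== CLAIM (what is proved, stated in full; the proofs are below) =====
def Claim_equal_eightyNine : Prop := ∀ (data : Int), Dom_eightyNine data → Spec_eightyNine data (eightyNine data)

-- ===== LEMMAS AND PROOFS =====

-- B's while-loop decides "no divisor j ≥ i with j*j ≤ m"
theorem trialB_char (m : Int) : ∀ k i, (m + 1 - i).toNat = k → 2 ≤ i →
    (trialB m i = true ↔ ∀ j, i ≤ j → j * j ≤ m → ¬ (j ∣ m)) := by
  intro k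
  induction k using Nat.strong_induction_on with
  | _ k ih =>
    intro i hk hi
    rw [trialB.eq_def]
    split
    · next hle =>
      have him : i ≤ m := by nlinarith
      by_cases hd : PySem.Int.mod m i == 0
      · rw [if_pos hd]
        have hdvd : (i ∣ m) := (PySem.Int.mod_eq_zero_iff_dvd m i).mp (by simpa using hd)
        simp only [Bool.false_eq_true, false_iff]
        intro h
        exact h i le_rfl hle hdvd
      · rw [if_neg hd]
        rw [ih (k - 1) (by omega) (i + 1) (by omega) (by omega)]
        constructor
        · intro h j hj hjm
          rcases eq_or_lt_of_le hj with rfl | hlt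
          · intro hdvd
            exact hd (by simpa using (PySem.Int.mod_eq_zero_iff_dvd m _).mpr hdvd)
          · exact h j (by omega) hjm
        · intro h j hj hjm
          exact h j (by omega) hjm
    · next hgt =>
      simp only [true_iff]
      intro j hj hjm
      exfalso
      have : i * i ≤ j * j := by nlinarith
      omega

theorem isPrimeB_char (m : Int) :
    isPrimeB m = true ↔ 2 ≤ m ∧ ∀ j, 2 ≤ j → j * j ≤ m → ¬ (j ∣ m) := by
  unfold isPrimeB
  split
  · next h => simp only [Bool.false_eq_true, false_iff]; intro hh; exact absurd hh.1 (by omega)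
  · next h =>
    rw [trialB_char m (m + 1 - 2).toNat 2 rfl (by omega)]
    constructor
    · intro hh; exact ⟨by omega, hh⟩
    · intro hh; exact hh.2

theorem isPrimeA_char (m : Int) :
    isPrimeA m = true ↔ 2 ≤ m ∧ ∀ j, 2 ≤ j → j * 2 ≤ m → ¬ (j ∣ m) := by
  unfold isPrimeA
  split
  · next h => simp only [Bool.false_eq_true, false_iff]; intro hh; exact absurd hh.1 (by omega)
  · next h =>
    rw [List.all_eq_true]
    constructor
    · intro hh
      refine ⟨by omega, fun j hj hjm hdvd => ?_⟩
      have hmem : j ∈ PySem.List.pyRange 2 (PySem.Int.floordiv m 2 + 1) 1 := by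
        rw [PySem.List.mem_pyRange_one]
        have : j ≤ PySem.Int.floordiv m 2 :=
          (PySem.Int.le_floordiv_iff_mul_le (by omega)).mpr hjm
        omega
      have := hh j hmem
      simp only [Bool.not_eq_eq_eq_not, Bool.not_true, beq_eq_false_iff_ne] at this
      exact this ((PySem.Int.mod_eq_zero_iff_dvd m j).mpr hdvd)
    · intro hh j hmem
      rw [PySem.List.mem_pyRange_one] at hmem
      have hjm : j * 2 ≤ m := by
        have : j ≤ PySem.Int.floordiv m 2 := by omega
        exact (PySem.Int.le_floordiv_iff_mul_le (by omega)).mp this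
      have := hh.2 j hmem.1 hjm
      simp only [Bool.not_eq_eq_eq_not, Bool.not_true, beq_eq_false_iff_ne]
      intro hz
      exact this ((PySem.Int.mod_eq_zero_iff_dvd m j).mp hz)

-- a divisor in [2, m/2] exists iff a divisor in [2, sqrt m] exists
theorem divisor_bridge (m : Int) (hm : 2 ≤ m) :
    (∀ j, 2 ≤ j → j * 2 ≤ m → ¬ (j ∣ m)) ↔ (∀ j, 2 ≤ j → j * j ≤ m → ¬ (j ∣ m)) := by
  constructor
  · intro h j hj hjm hdvd
    obtain ⟨k, hk⟩ := hdvd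
    have hjk : j ≤ k := by nlinarith
    exact h j hj (by nlinarith) ⟨k, hk⟩
  · intro h j hj hjm hdvd
    obtain ⟨k, hk⟩ := hdvd
    have hk2 : 2 ≤ k := by nlinarith
    by_cases hs : j * j ≤ m
    · exact h j hj hs ⟨k, hk⟩
    · have hkj : k < j := by nlinarith
      exact h k hk2 (by nlinarith) ⟨j, by linarith [hk, mul_comm j k]⟩

theorem isPrime_eq (m : Int) : isPrimeA m = isPrimeB m := by
  rw [Bool.eq_iff_iff, isPrimeA_char, isPrimeB_char]
  by_cases hm : 2 ≤ m
  · rw [divisor_bridge m hm]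
  · constructor
    · intro h; exact absurd h.1 hm
    · intro h; exact absurd h.1 hm

theorem isPrimeB_two_le {m : Int} (h : isPrimeB m = true) : 2 ≤ m :=
  ((isPrimeB_char m).mp h).1

-- a fold that skips non-p elements is a fold over the filtered list
theorem foldl_skip {α β : Type} (p : α → Bool) (f : β → α → β) (l : List α) (init : β) :
    l.foldl (fun acc x => if !p x then acc else f acc x) init = (l.filter p).foldl f init := by
  rw [List.foldl_filter]
  apply PySem.List.foldl_congr_mem
  intro acc x _
  cases h : p x
  · simp
  · simp

theorem innerB_eq (data ab a b : Int) :
    ∀ (l : List Int) (acc : List (List Int)),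
      innerB data ab a b acc l
        = acc ++ (l.takeWhile (fun c => decide (ab * c ≤ data))).map (fun c => [a, b, c]) := by
  intro l
  induction l with
  | nil => intro acc; simp [innerB]
  | cons c cs ih =>
    intro acc
    rw [innerB]
    by_cases hc : ab * c > data
    · rw [if_pos hc, List.takeWhile_cons, if_neg (by simpa using hc)]
      simp
    · rw [if_neg hc, ih, List.takeWhile_cons, if_pos (by simpa using not_lt.mp hc)]
      simp

-- on a strictly increasing list, the monotone bound turns filter into takeWhile (= break)
theorem filter_eq_takeWhile_of_sorted (K ab : Int) (hab : 0 < ab) :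
    ∀ l : List Int, l.Pairwise (· < ·) →
      l.filter (fun c => decide (ab * c ≤ K)) = l.takeWhile (fun c => decide (ab * c ≤ K)) := by
  intro l
  induction l with
  | nil => intro _; rfl
  | cons c cs ih =>
    intro hp
    rw [List.pairwise_cons] at hp
    by_cases hc : ab * c ≤ K
    · simp only [List.filter_cons, List.takeWhile_cons, decide_eq_true hc, if_true]
      rw [ih hp.2]
    · rw [List.filter_cons, List.takeWhile_cons, if_neg (by simpa using hc)]
      simp only [decide_eq_false hc, Bool.false_eq_true, if_false]
      rw [List.filter_eq_nil_iff.mpr]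
      intro x hx
      have hcx : c < x := hp.1 x hx
      simp only [decide_eq_true_eq]
      intro hle
      have : ab * c < ab * x := mul_lt_mul_of_pos_left hcx hab
      omega

theorem eightyNine_eq_flatMap (data : Int) :
    eightyNine data =
      ((PySem.List.pyRange 0 data 1).filter isPrimeA).flatMap (fun a =>
        ((PySem.List.pyRange 0 data 1).filter isPrimeA).flatMap (fun b =>
          (((PySem.List.pyRange 0 data 1).filter isPrimeA).filter
              (fun c => decide (a * b * c ≤ data))).map (fun c => [a, b, c]))) := by
  unfold eightyNine
  rw [foldl_skip]
  have hin : ∀ (a b : Int) (acc : List (List Int)),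
      ((PySem.List.pyRange 0 data 1).foldl (fun out three =>
        if !isPrimeA three then out
        else if a * b * three > data then out
        else out ++ [[a, b, three]]) acc)
      = acc ++ (((PySem.List.pyRange 0 data 1).filter isPrimeA).filter
              (fun c => decide (a * b * c ≤ data))).map (fun c => [a, b, c]) := by
    intro a b acc
    rw [foldl_skip]
    rw [show (fun (out : List (List Int)) three =>
        if a * b * three > data then out else out ++ [[a, b, three]])
      = (fun out three => if (fun c => decide (a * b * c ≤ data)) three
            then out ++ [(fun c => [a, b, c]) three] else out) from ?_]
    · rw [PySem.List.foldl_append_if]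
    · funext out three
      by_cases h : a * b * three > data
      · rw [if_pos h, if_neg (by simpa using h)]
      · rw [if_neg h, if_pos (by simpa using not_lt.mp h)]
  have hmid : ∀ (a : Int) (acc : List (List Int)),
      ((PySem.List.pyRange 0 data 1).foldl (fun out two =>
        if !isPrimeA two then out else
        (PySem.List.pyRange 0 data 1).foldl (fun out three =>
          if !isPrimeA three then out
          else if a * two * three > data then out
          else out ++ [[a, two, three]]) out) acc)
      = acc ++ ((PySem.List.pyRange 0 data 1).filter isPrimeA).flatMap (fun b =>
          (((PySem.List.pyRange 0 data 1).filter isPrimeA).filter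
              (fun c => decide (a * b * c ≤ data))).map (fun c => [a, b, c])) := by
    intro a acc
    rw [foldl_skip]
    rw [PySem.List.foldl_congr_mem (g := fun out b => out ++
        (((PySem.List.pyRange 0 data 1).filter isPrimeA).filter
            (fun c => decide (a * b * c ≤ data))).map (fun c => [a, b, c]))]
    · rw [PySem.List.foldl_append_eq_flatMap]
    · intro acc2 b _
      exact hin a b acc2
  rw [PySem.List.foldl_congr_mem (g := fun out a => out ++
      ((PySem.List.pyRange 0 data 1).filter isPrimeA).flatMap (fun b =>
        (((PySem.List.pyRange 0 data 1).filter isPrimeA).filter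
            (fun c => decide (a * b * c ≤ data))).map (fun c => [a, b, c])))]
  · rw [PySem.List.foldl_append_eq_flatMap]; simp
  · intro acc a _
    exact hmid a acc

theorem eightyNine_alt_eq_flatMap (data : Int) :
    eightyNine_alt data =
      ((PySem.List.pyRange 0 data 1).filter isPrimeB).flatMap (fun a =>
        ((PySem.List.pyRange 0 data 1).filter isPrimeB).flatMap (fun b =>
          (((PySem.List.pyRange 0 data 1).filter isPrimeB).takeWhile
              (fun c => decide (a * b * c ≤ data))).map (fun c => [a, b, c]))) := by
  unfold eightyNine_alt
  rw [PySem.List.foldl_congr_mem (g := fun out a => out ++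
      ((PySem.List.pyRange 0 data 1).filter isPrimeB).flatMap (fun b =>
        (((PySem.List.pyRange 0 data 1).filter isPrimeB).takeWhile
            (fun c => decide (a * b * c ≤ data))).map (fun c => [a, b, c])))]
  · rw [PySem.List.foldl_append_eq_flatMap]; simp
  · intro acc a _
    rw [PySem.List.foldl_congr_mem (g := fun out b =>
        out ++ (((PySem.List.pyRange 0 data 1).filter isPrimeB).takeWhile
            (fun c => decide (a * b * c ≤ data))).map (fun c => [a, b, c]))]
    · rw [PySem.List.foldl_append_eq_flatMap]
    · intro acc2 b _
      exact innerB_eq data (a * b) a b _ acc2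

-- ===== VERDICT (by name: the statement is the Claim_ definition above) =====
theorem eightyNine_spec : Claim_equal_eightyNine := by
  intro data _
  unfold Spec_eightyNine
  rw [eightyNine_eq_flatMap, eightyNine_alt_eq_flatMap]
  rw [show isPrimeA = isPrimeB from funext isPrime_eq]
  have hsort : ((PySem.List.pyRange 0 data 1).filter isPrimeB).Pairwise (· < ·) :=
    (PySem.List.pairwise_lt_pyRange_one 0 data).filter _
  rw [List.flatMap_def, List.flatMap_def]
  congr 1
  apply List.map_congr_left
  intro a ha
  rw [List.flatMap_def, List.flatMap_def]
  congr 1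
  apply List.map_congr_left
  intro b hb
  have ha2 : 2 ≤ a := isPrimeB_two_le (List.mem_filter.mp ha).2
  have hb2 : 2 ≤ b := isPrimeB_two_le (List.mem_filter.mp hb).2
  rw [filter_eq_takeWhile_of_sorted data (a * b) (by nlinarith) _ hsort]
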